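-- pv_equiv track=rewrite | github.com/pabloruizfv/lyrics-analysis | common/common.py | string_for_path
-- ===== SOURCE A (Python) =====
-- def string_for_path(text):
--     """
--     Given some text, modify it so that it can be used as a part of a Windows
--     path.
--     :param text: (string)
--     :return text: (string)
--     """
--     characters_to_replace_by_underscore = ['/', '\\', '|', ':', ' ', '.', '\n']
--     for ch in characters_to_replace_by_underscore:
--         text = text.replace(ch, '_')
--
--     characters_to_discard = ['<', '>', '\"', '*', '?']
--     for ch in characters_to_discard:
--         text = text.replace(ch, '')
--
--     return text
-- ===== SOURCE B (Python) =====
-- def string_for_path(text):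
--     """Single-pass rewrite: classify each character once instead of 12 full-string replace scans."""
--     replace_by_underscore = {'/', '\\', '|', ':', ' ', '.', '\n'}
--     discard = {'<', '>', '"', '*', '?'}
--     out = []
--     for c in text:
--         if c in replace_by_underscore:
--             out.append('_')
--         elif c in discard:
--             continue
--         else:
--             out.append(c)
--     return ''.join(out)
-- ===== Notes on version B (the rewrite author's own statement) =====
-- stated objective: simpler
-- what changed: Replaces twelve sequential full-string .replace() scans (each rebuilding the string) by one pass that classifies each character (to '_', dropped, or kept) and joins a single output buffer.
import Mathlib
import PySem

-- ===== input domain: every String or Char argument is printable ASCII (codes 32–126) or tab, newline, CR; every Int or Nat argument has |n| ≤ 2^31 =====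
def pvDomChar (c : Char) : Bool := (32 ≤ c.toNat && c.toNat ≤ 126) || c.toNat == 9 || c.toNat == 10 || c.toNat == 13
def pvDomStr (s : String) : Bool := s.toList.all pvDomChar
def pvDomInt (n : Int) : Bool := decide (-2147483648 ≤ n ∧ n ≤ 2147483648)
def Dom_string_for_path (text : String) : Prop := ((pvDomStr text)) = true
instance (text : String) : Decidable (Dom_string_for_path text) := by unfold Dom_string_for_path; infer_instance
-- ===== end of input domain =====

-- B rewrites twelve sequential full-string replace scans as one classifying pass over the characters (objective: simpler).


-- ===== PORT A =====
-- literal transliteration: two foldl loops over the constant character lists, each step a full-string replace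
def string_for_path (text : String) : String :=
  let text₁ := ['/', '\\', '|', ':', ' ', '.', '\n'].foldl
    (fun t ch => PySem.Str.replace t (String.ofList [ch]) "_") text
  ['<', '>', '\"', '*', '?'].foldl
    (fun t ch => PySem.Str.replace t (String.ofList [ch]) "") text₁

-- ===== PORT B =====
-- one pass: each character contributes "_", nothing, or itself; the pieces are joined
def pvClassify (c : Char) : List Char :=
  if c ∈ ['/', '\\', '|', ':', ' ', '.', '\n'] then ['_']
  else if c ∈ ['<', '>', '\"', '*', '?'] then []
  else [c]

def string_for_path_alt (text : String) : String :=
  String.ofList (text.toList.flatMap pvClassify)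

-- ===== PRECONDITION & SPEC =====
def Spec_string_for_path (text : String) (out : String) : Prop := out = string_for_path_alt text
instance (text : String) (out : String) : Decidable (Spec_string_for_path text out) := by unfold Spec_string_for_path; infer_instance

-- ===== CLAIM (what is proved, stated in full; the proofs are below) =====
def Claim_equal_string_for_path : Prop := ∀ (text : String), Dom_string_for_path text → Spec_string_for_path text (string_for_path text)

-- ===== LEMMAS AND PROOFS =====

-- a single-character replace is a flatMap over the string
theorem replace_go_single (a : Char) (new : List Char) :
    ∀ (fuel : Nat) (l acc : List Char), l.length ≤ fuel →
      PySem.Chars.replace.go [a] new fuel l acc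
        = acc.reverse ++ l.flatMap (fun c => if c = a then new else [c]) := by
  intro fuel
  induction fuel with
  | zero =>
    intro l acc h
    have : l = [] := List.eq_nil_of_length_eq_zero (Nat.le_zero.mp h)
    subst this
    simp [PySem.Chars.replace.go]
  | succ n ih =>
    intro l acc h
    cases l with
    | nil => simp [PySem.Chars.replace.go]
    | cons c t =>
      rw [PySem.Chars.replace.go]
      by_cases hc : c = a
      · subst hc
        have hpre : [c].isPrefixOf (c :: t) = true := by simp [List.isPrefixOf]
        simp only [hpre, if_pos, List.length_cons, List.length_nil, List.drop_succ_cons,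
          List.drop_zero]
        rw [ih t (new.reverse ++ acc) (Nat.le_of_succ_le_succ h)]
        simp
      · have hpre : [a].isPrefixOf (c :: t) = false := by
          simp [List.isPrefixOf]
          exact fun he => (hc he.symm).elim
        rw [if_neg (by simp [hpre])]
        rw [ih t (c :: acc) (Nat.le_of_succ_le_succ h)]
        simp [hc]

theorem replace_single (s : List Char) (a : Char) (new : List Char) :
    PySem.Chars.replace s [a] new = s.flatMap (fun c => if c = a then new else [c]) := by
  rw [PySem.Chars.replace]
  rw [if_neg (by simp)]
  exact replace_go_single a new s.length s [] (le_refl _)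

theorem str_replace_single_toList (s : String) (a : Char) (new : String) :
    (PySem.Str.replace s (String.ofList [a]) new).toList
      = s.toList.flatMap (fun c => if c = a then new.toList else [c]) := by
  rw [PySem.Str.toList_replace]
  simp [replace_single]

-- the character-level composition of the twelve replaces collapses to pvClassify
theorem chain_eq_classify (l : List Char) :
    ((((((((((((l.flatMap (fun c => if c = '/' then ['_'] else [c])).flatMap
      (fun c => if c = '\\' then ['_'] else [c])).flatMap
      (fun c => if c = '|' then ['_'] else [c])).flatMap
      (fun c => if c = ':' then ['_'] else [c])).flatMap
      (fun c => if c = ' ' then ['_'] else [c])).flatMap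
      (fun c => if c = '.' then ['_'] else [c])).flatMap
      (fun c => if c = '\n' then ['_'] else [c])).flatMap
      (fun c => if c = '<' then [] else [c])).flatMap
      (fun c => if c = '>' then [] else [c])).flatMap
      (fun c => if c = '\"' then [] else [c])).flatMap
      (fun c => if c = '*' then [] else [c])).flatMap
      (fun c => if c = '?' then [] else [c]))
      = l.flatMap pvClassify := by
  simp only [List.flatMap_assoc]
  apply List.flatMap_congr
  intro c _
  by_cases h1 : c = '/' <;> by_cases h2 : c = '\\' <;> by_cases h3 : c = '|' <;>
    by_cases h4 : c = ':' <;> by_cases h5 : c = ' ' <;> by_cases h6 : c = '.' <;>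
    by_cases h7 : c = '\n' <;> by_cases h8 : c = '<' <;> by_cases h9 : c = '>' <;>
    by_cases h10 : c = '\"' <;> by_cases h11 : c = '*' <;> by_cases h12 : c = '?' <;>
    simp_all [pvClassify]

-- ===== VERDICT (by name: the statement is the Claim_ definition above) =====
theorem string_for_path_spec : Claim_equal_string_for_path := by
  intro text _
  unfold Spec_string_for_path string_for_path string_for_path_alt
  simp only [List.foldl]
  apply String.toList_injective
  rw [String.toList_ofList]
  simp only [str_replace_single_toList,
    show ("_" : String).toList = ['_'] from rfl, show ("" : String).toList = [] from rfl]
  exact chain_eq_classify text.toList
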